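-- pv_equiv track=rewrite | github.com/jacksonpradolima/ufpr-ci182-trabalhos | 201802/Matematica/CI182MAT1/8 - Honrados/codigo/sudoku.py | linha
-- ===== SOURCE A (Python) =====
-- def linha(n):
-- 	#lista que criamos para usar ao longo do programa
-- 	#linha(n) é a lista com as posições de todas as linhas de um sudoku nxn
-- 	linha = []
-- 	for k in range(n):
-- 		#formula da k-ésima linha
-- 		l = []
-- 		for p in range(n): #p é cada elemento da k-ésima linha
-- 			l += [(k*n) + p] #deduzimos a fórmula para cada elemento da k-ésima linha
-- 		linha += [l]
-- 	return linha
-- ===== SOURCE B (Python) =====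
-- def linha(n):
--     if n <= 0:
--         return []
--     flat = list(range(n * n))
--     return [flat[k * n:(k + 1) * n] for k in range(n)]
-- ===== Notes on version B (the rewrite author's own statement) =====
-- stated objective: alternative
-- what changed: B builds the flat list 0..n*n-1 once and partitions it into n consecutive slices of length n, instead of recomputing each cell as k*n+p in a nested loop.
import Mathlib
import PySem

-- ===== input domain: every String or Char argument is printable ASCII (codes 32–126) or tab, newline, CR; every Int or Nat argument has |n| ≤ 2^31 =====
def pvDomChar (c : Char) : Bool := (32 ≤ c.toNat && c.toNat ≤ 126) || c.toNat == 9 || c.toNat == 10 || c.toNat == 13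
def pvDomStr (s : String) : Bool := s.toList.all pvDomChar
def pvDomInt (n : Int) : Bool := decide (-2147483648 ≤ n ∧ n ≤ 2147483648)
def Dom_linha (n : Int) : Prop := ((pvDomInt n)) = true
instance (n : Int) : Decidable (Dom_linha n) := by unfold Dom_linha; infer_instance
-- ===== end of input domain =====

-- B builds the flat list 0..n*n-1 once and slices it into n consecutive rows,
-- instead of A's nested loop computing each cell as k*n+p; same cost, different decomposition.

-- ===== PORT A =====
def linha (n : Int) : List (List Int) :=
  (PySem.List.pyRange 0 n 1).foldl
    (fun acc k =>
      acc ++ [(PySem.List.pyRange 0 n 1).foldl (fun l p => l ++ [k * n + p]) []])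
    []

-- ===== PORT B =====
def linha_alt (n : Int) : List (List Int) :=
  if n ≤ 0 then []
  else
  let flat := PySem.List.pyRange 0 (n * n) 1
  (PySem.List.pyRange 0 n 1).map
    (fun k => PySem.List.slice flat (some (k * n)) (some ((k + 1) * n)))

-- ===== PRECONDITION & SPEC =====
def Spec_linha (n : Int) (out : List (List Int)) : Prop := out = linha_alt n
instance (n : Int) (out : List (List Int)) : Decidable (Spec_linha n out) := by unfold Spec_linha; infer_instance

-- ===== CLAIM (what is proved, stated in full; the proofs are below) =====
def Claim_equal_linha : Prop := ∀ (n : Int), Dom_linha n → Spec_linha n (linha n)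

-- ===== LEMMAS AND PROOFS =====

theorem pv_foldl_append (f : Int → Int) (xs : List Int) (acc : List Int) :
    xs.foldl (fun l p => l ++ [f p]) acc = acc ++ xs.map f := by
  induction xs generalizing acc with
  | nil => simp
  | cons x xs ih => simp [List.foldl, ih]

theorem pv_foldl_append_rows (g : Int → List Int) (xs : List Int) (acc : List (List Int)) :
    xs.foldl (fun l k => l ++ [g k]) acc = acc ++ xs.map g := by
  induction xs generalizing acc with
  | nil => simp
  | cons x xs ih => simp [List.foldl, ih]

theorem pv_linha_map (n : Int) :
    linha n = (PySem.List.pyRange 0 n 1).map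
      (fun k => (PySem.List.pyRange 0 n 1).map (fun p => k * n + p)) := by
  unfold linha
  rw [pv_foldl_append_rows]
  simp only [List.nil_append]
  apply List.map_congr_left
  intro k _
  rw [pv_foldl_append]
  simp

theorem pv_slice_generic (a b m n : Int) (ha : 0 ≤ a) (hb : b = a + n) (hbm : b ≤ m) (hn : 0 < n) :
    PySem.List.slice (PySem.List.pyRange 0 m 1) (some a) (some b)
      = (PySem.List.pyRange 0 n 1).map (fun p => a + p) := by
  rw [PySem.List.slice_toNat _ ha (by omega : (0:Int) ≤ b),
      PySem.List.pyRange_one, PySem.List.pyRange_one]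
  apply List.ext_getElem
  · simp; omega
  · intro i h1 h2
    simp only [List.getElem_take, List.getElem_drop, List.getElem_map, List.getElem_range]
    omega

theorem pv_slice_row (n k : Int) (h0 : 0 ≤ k) (h1 : k < n) :
    PySem.List.slice (PySem.List.pyRange 0 (n * n) 1) (some (k * n)) (some ((k + 1) * n))
      = (PySem.List.pyRange 0 n 1).map (fun p => k * n + p) := by
  have hn : 0 < n := lt_of_le_of_lt h0 h1
  exact pv_slice_generic (k * n) ((k + 1) * n) (n * n) n
    (mul_nonneg h0 (le_of_lt hn)) (by ring) (by nlinarith) hn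

-- ===== VERDICT (by name: the statement is the Claim_ definition above) =====
theorem linha_spec : Claim_equal_linha := by
  intro n _
  unfold Spec_linha linha_alt
  rw [pv_linha_map]
  by_cases hn : n ≤ 0
  · simp [hn, PySem.List.pyRange_one_eq_nil hn]
  simp only [if_neg hn]
  apply List.map_congr_left
  intro k hk
  rw [PySem.List.mem_pyRange_one] at hk
  exact (pv_slice_row n k hk.1 hk.2).symm
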